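-- pv_equiv track=rewrite | github.com/BLXNK-333/leetcode | solutions/py/grid-game.py | _get_best_points
-- ===== SOURCE A (Python) =====
-- from typing import List
--
-- def _get_best_points(grid: List[List[int]]) -> int:
--     S1, S2 = sum(grid[0]), sum(grid[1])
--     n = len(grid[0])
--     R_sum = 0
--
--     for i in range(n):
--         s1 = S1 - grid[0][i]
--         if s1 >= S2:
--             S1 = s1
--             S2 -= grid[1][i]
--             R_sum += grid[0][i]
--             grid[0][i] = 0
--         else:
--             R_sum += grid[0][i]
--             grid[0][i] = 0
--             while i < n:
--                 R_sum += grid[1][i]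
--                 grid[1][i] = 0
--                 i += 1
--             return R_sum
--
--     last = grid[1][-1]
--     grid[1][-1] = 0
--     return R_sum + last
-- ===== SOURCE B (Python) =====
-- from typing import List
--
-- def _get_best_points(grid: List[List[int]]) -> int:
--     top, bot = grid[0], grid[1]
--     n = len(top)
--     suf_top = [0] * (n + 1)
--     suf_bot = [0] * (n + 1)
--     for i in range(n - 1, -1, -1):
--         suf_top[i] = suf_top[i + 1] + top[i]
--         suf_bot[i] = suf_bot[i + 1] + bot[i]
--     k = n - 1
--     for i in range(n):
--         if suf_top[i + 1] < suf_bot[i]: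
--             k = i
--             break
--     for i in range(k + 1):
--         top[i] = 0
--     for i in range(k, n):
--         bot[i] = 0
--     return suf_top[0] - suf_top[k + 1] + suf_bot[k]
-- ===== Notes on version B (the rewrite author's own statement) =====
-- stated objective: alternative
-- what changed: Replaces A's stateful forward scan (running totals S1/S2 updated in place, an inner while loop and an early return) by precomputed suffix-sum arrays, a pure breakpoint search for the first k with sufTop[k+1] < sufBot[k] (default n-1), and one closed formula sufTop[0]-sufTop[k+1]+sufBot[k]; the same cells are zeroed in two final loops.
-- outside the precondition, e.g. on _get_best_points([[10], [3, -9]]): A returns 1, B returns 13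
import Mathlib
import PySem

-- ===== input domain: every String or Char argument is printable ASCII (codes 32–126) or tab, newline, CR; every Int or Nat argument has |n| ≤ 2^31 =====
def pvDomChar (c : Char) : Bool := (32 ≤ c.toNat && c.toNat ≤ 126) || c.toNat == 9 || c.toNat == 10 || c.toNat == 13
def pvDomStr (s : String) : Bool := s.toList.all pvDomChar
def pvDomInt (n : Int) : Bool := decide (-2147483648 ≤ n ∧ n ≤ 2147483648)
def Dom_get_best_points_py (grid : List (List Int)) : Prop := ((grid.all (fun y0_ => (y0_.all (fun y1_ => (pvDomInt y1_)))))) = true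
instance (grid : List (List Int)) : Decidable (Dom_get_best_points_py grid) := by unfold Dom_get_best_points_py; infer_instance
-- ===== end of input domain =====

-- B differs from A in decomposition only: suffix-sum arrays, a breakpoint search and one
-- closed formula instead of A's stateful scan with an inner while loop and early return.
-- A mutates grid in place; B performs the same mutation, but the equivalence proved here is
-- about the RETURN value only (the ports drop the zeroing writes, which the result never reads).

-- ===== PORT A =====
-- the inner `while i < n: R_sum += grid[1][i]; i += 1` of A's else branch
def pyAWhile (bot : List Int) (n i : Nat) (R : Int) : Int :=
  if i < n then pyAWhile bot n (i + 1) (R + bot.getD i 0) else R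
  termination_by n - i

-- the `for i in range(n)` loop of A, carrying its mutable state S1 S2 R_sum;
-- after the loop A returns R_sum + grid[1][-1]
def pyALoop (top bot : List Int) (n i : Nat) (S1 S2 R : Int) : Int :=
  if i < n then
    let s1 := S1 - top.getD i 0
    if S2 ≤ s1 then
      pyALoop top bot n (i + 1) s1 (S2 - bot.getD i 0) (R + top.getD i 0)
    else
      pyAWhile bot n i (R + top.getD i 0)
  else R + bot.getD (bot.length - 1) 0
  termination_by n - i

def get_best_points_py (grid : List (List Int)) : Int :=
  let top := grid.getD 0 []
  let bot := grid.getD 1 []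
  pyALoop top bot top.length 0 top.sum bot.sum 0

-- ===== PORT B =====
-- B's backward loop filling suf[i] = suf[i+1] + xs[i] builds the suffix-sum list right-to-left
def sufList (xs : List Int) : List Int :=
  match xs with
  | [] => [0]
  | x :: rest =>
      let s := sufList rest
      (x + s.getD 0 0) :: s

-- B's forward loop: first i < n with suf_top[i+1] < suf_bot[i], default n - 1
def findK (sufT sufB : List Int) (n i : Nat) : Nat :=
  if i < n then
    if sufT.getD (i + 1) 0 < sufB.getD i 0 then i else findK sufT sufB n (i + 1)
  else n - 1
  termination_by n - i

def get_best_points_py_alt (grid : List (List Int)) : Int :=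
  let top := grid.getD 0 []
  let bot := grid.getD 1 []
  let n := top.length
  let sufT := sufList top
  let sufB := sufList bot
  let k := findK sufT sufB n 0
  sufT.getD 0 0 - sufT.getD (k + 1) 0 + sufB.getD k 0

-- ===== PRECONDITION & SPEC =====
-- Pre_ restricts to well-formed 2×n grids (at least two rows, the first two of equal nonzero
-- length): on ragged or empty rows A either raises IndexError (n = 0 or a too-short second row)
-- or returns a value that depends on the accidental extra/missing tail of row 1.
def Pre_get_best_points_py (grid : List (List Int)) : Prop :=
  2 ≤ grid.length ∧ (grid.getD 0 []).length = (grid.getD 1 []).length ∧ grid.getD 0 [] ≠ []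
instance (grid : List (List Int)) : Decidable (Pre_get_best_points_py grid) := by
  unfold Pre_get_best_points_py; infer_instance
def pvWitness_get_best_points_py : List (List Int) := [[1, 2], [3, 4]]

def Spec_get_best_points_py (grid : List (List Int)) (out : Int) : Prop := out = get_best_points_py_alt grid
instance (grid : List (List Int)) (out : Int) : Decidable (Spec_get_best_points_py grid out) := by unfold Spec_get_best_points_py; infer_instance

-- ===== CLAIM (what is proved, stated in full; the proofs are below) =====
def Claim_equal_get_best_points_py : Prop := ∀ (grid : List (List Int)), Dom_get_best_points_py grid → Pre_get_best_points_py grid → Spec_get_best_points_py grid (get_best_points_py grid)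

-- ===== LEMMAS AND PROOFS =====

theorem sufList_getD (xs : List Int) (i : Nat) :
    (sufList xs).getD i 0 = (xs.drop i).sum := by
  induction xs generalizing i with
  | nil => cases i <;> simp [sufList, List.getD]
  | cons x rest ih =>
      cases i with
      | zero =>
          have h0 := ih 0
          simp only [List.drop_zero] at h0
          simp only [sufList, List.getD_cons_zero, List.drop_zero, List.sum_cons]
          rw [h0]
      | succ j =>
          simp only [sufList, List.getD_cons_succ, List.drop_succ_cons]
          exact ih j

theorem dropSum (xs : List Int) (i : Nat) (h : i < xs.length) :
    (xs.drop i).sum = xs.getD i 0 + (xs.drop (i + 1)).sum := by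
  rw [List.drop_eq_getElem_cons h, List.sum_cons]
  simp [List.getD, List.getElem?_eq_getElem h]

theorem pyAWhile_eq (bot : List Int) (n : Nat) (hb : bot.length = n) :
    ∀ d i R, n - i = d → i ≤ n →
      pyAWhile bot n i R = R + (bot.drop i).sum := by
  intro d
  induction d with
  | zero =>
      intro i R hd hi
      have hin : i = n := by omega
      rw [pyAWhile, if_neg (by omega), List.drop_eq_nil_of_le (by omega)]
      simp
  | succ d ih =>
      intro i R hd hi
      have hlt : i < n := by omega
      rw [pyAWhile, if_pos hlt,
        ih (i + 1) (R + bot.getD i 0) (by omega) (by omega),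
        dropSum bot i (by omega)]
      ring

theorem pyALoop_eq (top bot : List Int) (n : Nat) (ht : top.length = n)
    (hb : bot.length = n) (h1 : 0 < n) :
    ∀ d i, n - i = d → i ≤ n →
      pyALoop top bot n i ((top.drop i).sum) ((bot.drop i).sum)
          (top.sum - (top.drop i).sum)
        = top.sum - (top.drop (findK (sufList top) (sufList bot) n i + 1)).sum
            + (bot.drop (findK (sufList top) (sufList bot) n i)).sum := by
  intro d
  induction d with
  | zero =>
      intro i hd hi
      have hin : i = n := by omega
      subst hin
      rw [pyALoop, findK, if_neg (by omega), if_neg (by omega)]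
      rw [dropSum bot (i - 1) (by omega),
        List.drop_eq_nil_of_le (by omega : bot.length ≤ i - 1 + 1),
        List.drop_eq_nil_of_le (by omega : top.length ≤ i),
        List.drop_eq_nil_of_le (by omega : top.length ≤ i - 1 + 1)]
      simp [hb]
  | succ d ih =>
      intro i hd hi
      have hlt : i < n := by omega
      rw [pyALoop, findK, if_pos hlt, if_pos hlt]
      simp only [sufList_getD]
      have hs1 : (top.drop i).sum - top.getD i 0 = (top.drop (i + 1)).sum := by
        rw [dropSum top i (by omega)]; ring
      by_cases hc : (bot.drop i).sum ≤ (top.drop i).sum - top.getD i 0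
      · -- continue: A takes the if-branch, B's findK moves on to i+1
        have hnotlt : ¬ (top.drop (i + 1)).sum < (bot.drop i).sum := by
          rw [hs1] at hc; omega
        rw [if_pos hc, if_neg hnotlt]
        have hS2 : (bot.drop i).sum - bot.getD i 0 = (bot.drop (i + 1)).sum := by
          rw [dropSum bot i (by omega)]; ring
        have hR : top.sum - (top.drop i).sum + top.getD i 0
            = top.sum - (top.drop (i + 1)).sum := by
          rw [dropSum top i (by omega)]; ring
        rw [hs1, hS2, hR]
        exact ih (i + 1) (by omega) (by omega)
      · -- break: A enters the else branch with the while loop, findK returns i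
        have hltb : (top.drop (i + 1)).sum < (bot.drop i).sum := by
          rw [hs1] at hc; omega
        rw [if_neg hc, if_pos hltb,
          pyAWhile_eq bot n hb (n - i) i _ rfl (by omega),
          dropSum top i (by omega)]
        ring

-- ===== VERDICT (by name: the statement is the Claim_ definition above) =====
theorem get_best_points_py_spec : Claim_equal_get_best_points_py := by
  intro grid _ hpre
  obtain ⟨h2, heq, hne⟩ := hpre
  have h1 : 0 < (grid.getD 0 []).length := by
    cases h : grid.getD 0 [] with
    | nil => exact absurd h hne
    | cons a l => simp
  have key := pyALoop_eq (grid.getD 0 []) (grid.getD 1 []) (grid.getD 0 []).length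
    rfl heq.symm h1 ((grid.getD 0 []).length) 0 rfl (Nat.zero_le _)
  simp only [List.drop_zero, sub_self] at key
  unfold Spec_get_best_points_py
  simp only [get_best_points_py, get_best_points_py_alt, sufList_getD, List.drop_zero]
  exact key
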